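-- pv_equiv track=rewrite | github.com/ssebastianj/taip-2012 | baile-reconciliacion/solution.py | solve
-- ===== SOURCE A (Python) =====
-- from itertools import combinations_with_replacement
--
-- def solve(numero_bailes):
--     combinaciones_invitados = []
--     combinaciones_invitados_append = combinaciones_invitados.append
--
--     for invite in combinations_with_replacement(range(numero_bailes + 1), 3):
--         nlogonia, cuadradonia, cubiconia = invite
--
--         if cubiconia >= cuadradonia >= nlogonia:
--             producto = cubiconia * cuadradonia + cubiconia * nlogonia + \
--                 cuadradonia * nlogonia
--
--             if producto == numero_bailes:
--                 combinaciones_invitados_append(invite)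
--
--     return len(combinaciones_invitados)
-- ===== SOURCE B (Python) =====
-- def solve(numero_bailes):
--     # For each pair a <= b, solve a*b + c*(a+b) == n for c by divisibility
--     # instead of scanning all c (the a == b == 0 column contributes only when n == 0).
--     total = 0
--     for a in range(numero_bailes + 1):
--         for b in range(a, numero_bailes + 1):
--             if a == 0 and b == 0:
--                 if numero_bailes == 0:
--                     total += 1
--             elif (numero_bailes - a * b) % (a + b) == 0 and \
--                     (numero_bailes - a * b) // (a + b) >= b:
--                 total += 1
--     return total
-- ===== Notes on version B (the rewrite author's own statement) =====
-- stated objective: faster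
-- what changed: B drops A's scan over the third guest count: for each pair a<=b it solves a*b + c*(a+b) == n for c by a divisibility test (with the a=b=0 column contributing only when n==0), turning A's O(n^3) triple enumeration into an O(n^2) pair loop.
import Mathlib
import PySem

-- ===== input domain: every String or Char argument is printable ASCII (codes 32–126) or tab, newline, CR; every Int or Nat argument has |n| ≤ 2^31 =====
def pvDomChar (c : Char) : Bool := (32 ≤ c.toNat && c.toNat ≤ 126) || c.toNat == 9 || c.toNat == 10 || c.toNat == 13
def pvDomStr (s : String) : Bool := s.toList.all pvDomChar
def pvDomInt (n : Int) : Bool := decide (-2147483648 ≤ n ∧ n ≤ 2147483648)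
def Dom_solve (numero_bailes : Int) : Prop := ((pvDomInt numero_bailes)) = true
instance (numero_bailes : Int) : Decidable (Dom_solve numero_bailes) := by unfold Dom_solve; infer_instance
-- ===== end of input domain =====

-- B replaces A's scan over the third coordinate by a divisibility test: O(n^2) pairs instead of O(n^3) triples.

-- ===== PORT A =====
-- combinations_with_replacement(range(n+1), 3) emits exactly the triples a ≤ b ≤ c of
-- range(n+1) in lexicographic order; ported as the equivalent nested-range flatMap.
def solve (numero_bailes : Int) : Int :=
  let combos : List (Int × Int × Int) :=
    (PySem.List.pyRange 0 (numero_bailes + 1) 1).flatMap (fun a =>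
      (PySem.List.pyRange a (numero_bailes + 1) 1).flatMap (fun b =>
        (PySem.List.pyRange b (numero_bailes + 1) 1).map (fun c => (a, b, c))))
  let combinaciones_invitados :=
    combos.foldl (fun lst invite =>
      if invite.2.2 ≥ invite.2.1 ∧ invite.2.1 ≥ invite.1 then
        if invite.2.2 * invite.2.1 + invite.2.2 * invite.1 + invite.2.1 * invite.1 = numero_bailes
        then lst ++ [invite] else lst
      else lst) ([] : List (Int × Int × Int))
  (combinaciones_invitados.length : Int)

-- ===== PORT B =====
def solve_alt (numero_bailes : Int) : Int :=
  (PySem.List.pyRange 0 (numero_bailes + 1) 1).foldl (fun total a =>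
    (PySem.List.pyRange a (numero_bailes + 1) 1).foldl (fun total b =>
      if a = 0 ∧ b = 0 then
        (if numero_bailes = 0 then total + 1 else total)
      else if PySem.Int.mod (numero_bailes - a * b) (a + b) = 0 ∧
              b ≤ PySem.Int.floordiv (numero_bailes - a * b) (a + b) then
        total + 1
      else total) total) 0

-- ===== PRECONDITION & SPEC =====
def Spec_solve (numero_bailes : Int) (out : Int) : Prop := out = solve_alt numero_bailes
instance (numero_bailes : Int) (out : Int) : Decidable (Spec_solve numero_bailes out) := by unfold Spec_solve; infer_instance

-- ===== CLAIM (what is proved, stated in full; the proofs are below) =====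
def Claim_equal_solve : Prop := ∀ (numero_bailes : Int), Dom_solve numero_bailes → Spec_solve numero_bailes (solve numero_bailes)

-- ===== LEMMAS AND PROOFS =====

-- per-(a,b) indicator of B's inner-loop body
def bInd (n a b : Int) : Int :=
  if a = 0 ∧ b = 0 then (if n = 0 then 1 else 0)
  else if PySem.Int.mod (n - a * b) (a + b) = 0 ∧
          b ≤ PySem.Int.floordiv (n - a * b) (a + b) then 1
  else 0

-- length of the 'append-if' fold is a countP
theorem foldl_len {α : Type} (p : α → Prop) [DecidablePred p] (l : List α) (acc : List α) :
    (l.foldl (fun lst t => if p t then lst ++ [t] else lst) acc).length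
      = acc.length + l.countP (fun t => decide (p t)) := by
  induction l generalizing acc with
  | nil => simp
  | cons x t ih =>
    by_cases h : p x
    · simp [h, ih]
      omega
    · simp [h, ih]

theorem countP_flatMap' {α β : Type} (l : List α) (f : α → List β) (p : β → Bool) :
    (l.flatMap f).countP p = (l.map fun a => (f a).countP p).sum := by
  induction l with
  | nil => simp
  | cons x t ih => simp [List.flatMap_cons, List.countP_append, ih]

-- the heart: counting solutions c of c*s = m in a range is a divisibility test
theorem countP_linear (s m lo hi : Int) (hs : 0 < s) :
    ((PySem.List.pyRange lo hi 1).countP (fun c => decide (c * s = m)))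
      = if s ∣ m ∧ lo ≤ m / s ∧ m / s < hi then 1 else 0 := by
  by_cases hd : s ∣ m
  · have hiff : ∀ c : Int, c * s = m ↔ c = m / s := by
      intro c
      constructor
      · intro h; rw [← h]; rw [Int.mul_ediv_cancel _ (by omega)]
      · rintro rfl; exact Int.ediv_mul_cancel hd
    have hcnt : (PySem.List.pyRange lo hi 1).countP (fun c => decide (c * s = m))
        = (PySem.List.pyRange lo hi 1).count (m / s) := by
      rw [List.count]
      refine List.countP_congr ?_
      intro c _
      rw [Bool.eq_iff_iff]
      simp [hiff c]
    rw [hcnt]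
    by_cases hin : lo ≤ m / s ∧ m / s < hi
    · have hmem : m / s ∈ PySem.List.pyRange lo hi 1 := by
        rw [PySem.List.mem_pyRange_one]; exact hin
      simp only [hd, hin, and_self, if_true]
      exact List.count_eq_one_of_mem (PySem.List.nodup_pyRange_one _ _) hmem
    · have hnmem : m / s ∉ PySem.List.pyRange lo hi 1 := by
        rw [PySem.List.mem_pyRange_one]; exact hin
      simp only [hd, hin, true_and, if_false]
      exact List.count_eq_zero_of_not_mem hnmem
  · rw [List.countP_eq_zero.2, if_neg (by tauto)]
    intro c _
    simp only [decide_eq_true_eq]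
    intro h; exact hd ⟨c, by rw [← h, mul_comm]⟩

-- the inner c-loop of A equals B's indicator, for 0 ≤ a ≤ b ≤ n
theorem cast_sum_map {α : Type} (l : List α) (f : α → Nat) :
    (((l.map f).sum : Nat) : Int) = (l.map (fun x => ((f x : Nat) : Int))).sum := by
  induction l with
  | nil => simp
  | cons x t ih => simp [ih]

theorem inner_eq (n a b : Int) (h0 : 0 ≤ a) (hab : a ≤ b) (hbn : b < n + 1) :
    (((PySem.List.pyRange b (n + 1) 1).countP
        (fun c => decide ((c ≥ b ∧ b ≥ a) ∧ c * b + c * a + b * a = n))) : Int)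
      = bInd n a b := by
  have hcongr : (PySem.List.pyRange b (n + 1) 1).countP
        (fun c => decide ((c ≥ b ∧ b ≥ a) ∧ c * b + c * a + b * a = n))
      = (PySem.List.pyRange b (n + 1) 1).countP (fun c => decide (c * (a + b) = n - a * b)) := by
    refine List.countP_congr ?_
    intro c hc
    rw [PySem.List.mem_pyRange_one] at hc
    simp only [decide_eq_true_eq]
    have hring : c * (a + b) = c * a + c * b := by ring
    have hcomm : b * a = a * b := mul_comm b a
    constructor
    · rintro ⟨_, h⟩; linarith
    · intro h; exact ⟨⟨hc.1, hab⟩, by linarith⟩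
  rw [hcongr]
  by_cases h00 : a = 0 ∧ b = 0
  · obtain ⟨rfl, rfl⟩ := h00
    by_cases hn : n = 0
    · subst hn; decide
    · rw [List.countP_eq_zero.2 ?_]
      · simp [bInd, hn]
      · intro c _
        simp only [decide_eq_true_eq, add_zero, mul_zero]
        omega
  · have hs : 0 < a + b := by rcases not_and_or.mp h00 with h | h <;> omega
    rw [countP_linear _ _ _ _ hs]
    unfold bInd
    rw [if_neg h00]
    have hmod : (PySem.Int.mod (n - a * b) (a + b) = 0) ↔ (a + b) ∣ (n - a * b) :=
      PySem.Int.mod_eq_zero_iff_dvd _ _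
    have hfd : PySem.Int.floordiv (n - a * b) (a + b) = (n - a * b) / (a + b) :=
      PySem.Int.floordiv_eq_ediv_of_pos hs
    have hextra : (a + b) ∣ (n - a * b) → b ≤ (n - a * b) / (a + b) →
        (n - a * b) / (a + b) < n + 1 := by
      intro hd hb
      have hq : (n - a * b) / (a + b) * (a + b) = n - a * b := Int.ediv_mul_cancel hd
      have h1 : 0 ≤ (n - a * b) / (a + b) := le_trans (le_trans h0 hab) hb
      have h2 : (n - a * b) / (a + b) ≤ (n - a * b) / (a + b) * (a + b) := by nlinarith
      have h3 : 0 ≤ a * b := mul_nonneg h0 (le_trans h0 hab)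
      linarith
    have hiff : ((a + b) ∣ (n - a * b) ∧ b ≤ (n - a * b) / (a + b) ∧
          (n - a * b) / (a + b) < n + 1)
        ↔ (PySem.Int.mod (n - a * b) (a + b) = 0 ∧
          b ≤ PySem.Int.floordiv (n - a * b) (a + b)) := by
      rw [hfd, hmod]
      exact ⟨fun ⟨x, y, _⟩ => ⟨x, y⟩, fun ⟨x, y⟩ => ⟨x, y, hextra x y⟩⟩
    by_cases hc : (a + b) ∣ (n - a * b) ∧ b ≤ (n - a * b) / (a + b) ∧
        (n - a * b) / (a + b) < n + 1
    · rw [if_pos hc, if_pos (hiff.mp hc)]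
      simp
    · rw [if_neg hc, if_neg (fun h => hc (hiff.mpr h))]
      simp

theorem solve_eq_sum (n : Int) :
    solve n = ((PySem.List.pyRange 0 (n + 1) 1).map (fun a =>
      ((PySem.List.pyRange a (n + 1) 1).map (fun b =>
        (((PySem.List.pyRange b (n + 1) 1).countP
          (fun c => decide ((c ≥ b ∧ b ≥ a) ∧ c * b + c * a + b * a = n))) : Int))).sum)).sum := by
  have hfun : (fun (lst : List (Int × Int × Int)) (invite : Int × Int × Int) =>
      if invite.2.2 ≥ invite.2.1 ∧ invite.2.1 ≥ invite.1 then
        if invite.2.2 * invite.2.1 + invite.2.2 * invite.1 + invite.2.1 * invite.1 = n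
        then lst ++ [invite] else lst
      else lst)
    = (fun lst invite =>
      if (invite.2.2 ≥ invite.2.1 ∧ invite.2.1 ≥ invite.1) ∧
          invite.2.2 * invite.2.1 + invite.2.2 * invite.1 + invite.2.1 * invite.1 = n
      then lst ++ [invite] else lst) := by
    funext lst t
    by_cases h1 : t.2.2 ≥ t.2.1 ∧ t.2.1 ≥ t.1 <;>
      by_cases h2 : t.2.2 * t.2.1 + t.2.2 * t.1 + t.2.1 * t.1 = n <;>
        simp [h1, h2]
  simp only [solve]
  rw [hfun, foldl_len, countP_flatMap']
  have hinner : ∀ a : Int,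
      ((PySem.List.pyRange a (n + 1) 1).flatMap (fun b =>
        (PySem.List.pyRange b (n + 1) 1).map (fun c => (a, b, c)))).countP
          (fun t => decide ((t.2.2 ≥ t.2.1 ∧ t.2.1 ≥ t.1) ∧
            t.2.2 * t.2.1 + t.2.2 * t.1 + t.2.1 * t.1 = n))
      = ((PySem.List.pyRange a (n + 1) 1).map (fun b =>
          (PySem.List.pyRange b (n + 1) 1).countP
            (fun c => decide ((c ≥ b ∧ b ≥ a) ∧ c * b + c * a + b * a = n)))).sum := by
    intro a
    rw [countP_flatMap']
    refine congrArg List.sum (List.map_congr_left ?_)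
    intro b _
    rw [List.countP_map]
    rfl
  simp only [List.length_nil, Nat.zero_add, hinner]
  rw [cast_sum_map]
  refine congrArg List.sum (List.map_congr_left ?_)
  intro a _
  rw [cast_sum_map]

theorem solve_alt_eq_sum (n : Int) :
    solve_alt n = ((PySem.List.pyRange 0 (n + 1) 1).map (fun a =>
      ((PySem.List.pyRange a (n + 1) 1).map (fun b => bInd n a b)).sum)).sum := by
  have hinner : ∀ (a : Int) (total : Int),
      (PySem.List.pyRange a (n + 1) 1).foldl (fun total b =>
        if a = 0 ∧ b = 0 then
          (if n = 0 then total + 1 else total)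
        else if PySem.Int.mod (n - a * b) (a + b) = 0 ∧
                b ≤ PySem.Int.floordiv (n - a * b) (a + b) then
          total + 1
        else total) total
      = total + ((PySem.List.pyRange a (n + 1) 1).map (fun b => bInd n a b)).sum := by
    intro a total
    have hbody : (fun (total : Int) (b : Int) =>
        if a = 0 ∧ b = 0 then
          (if n = 0 then total + 1 else total)
        else if PySem.Int.mod (n - a * b) (a + b) = 0 ∧
                b ≤ PySem.Int.floordiv (n - a * b) (a + b) then
          total + 1
        else total)
      = (fun total b => total + bInd n a b) := by
      funext total b
      unfold bInd
      split_ifs <;> simp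
    rw [hbody, PySem.List.foldl_add]
  unfold solve_alt
  have houter : (fun (total : Int) (a : Int) =>
      (PySem.List.pyRange a (n + 1) 1).foldl (fun total b =>
        if a = 0 ∧ b = 0 then
          (if n = 0 then total + 1 else total)
        else if PySem.Int.mod (n - a * b) (a + b) = 0 ∧
                b ≤ PySem.Int.floordiv (n - a * b) (a + b) then
          total + 1
        else total) total)
    = (fun total a => total + ((PySem.List.pyRange a (n + 1) 1).map (fun b => bInd n a b)).sum) := by
    funext total a
    exact hinner a total
  rw [houter, PySem.List.foldl_add]
  simp

-- ===== VERDICT (by name: the statement is the Claim_ definition above) =====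
theorem solve_spec : Claim_equal_solve := by
  intro n _
  show solve n = solve_alt n
  rw [solve_eq_sum, solve_alt_eq_sum]
  refine congrArg List.sum (List.map_congr_left ?_)
  intro a ha
  refine congrArg List.sum (List.map_congr_left ?_)
  intro b hb
  rw [PySem.List.mem_pyRange_one] at ha hb
  exact inner_eq n a b ha.1 hb.1 hb.2
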